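-- pv_equiv track=rewrite | github.com/yasufumi-nakata/omoikane | src/omoikane/self_construction/builders.py | _is_within_scope
-- ===== SOURCE A (Python) =====
-- from typing import Any, Dict, Mapping, Sequence
--
-- def _is_within_scope(candidate: str, scope_roots: Sequence[str]) -> bool:
--     normalized_candidate = candidate.rstrip("/")
--     for scope in scope_roots:
--         normalized_scope = scope.rstrip("/")
--         if normalized_candidate == normalized_scope or normalized_candidate.startswith(
--             f"{normalized_scope}/"
--         ):
--             return True
--     return False
-- ===== SOURCE B (Python) =====
-- def _is_within_scope(candidate, scope_roots):
--     normalized = candidate.rstrip("/")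
--     prefixes = {normalized}
--     prefixes.update(normalized[:i] for i, ch in enumerate(normalized) if ch == "/")
--     scopes = {scope.rstrip("/") for scope in scope_roots}
--     return not prefixes.isdisjoint(scopes)
-- ===== Notes on version B (the rewrite author's own statement) =====
-- stated objective: alternative
-- what changed: Inverts the loop: instead of scanning scope_roots and testing each with ==/startswith, B builds the set of all '/'-boundary ancestor prefixes of the candidate once and tests the normalized-scope set for intersection.
import Mathlib
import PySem

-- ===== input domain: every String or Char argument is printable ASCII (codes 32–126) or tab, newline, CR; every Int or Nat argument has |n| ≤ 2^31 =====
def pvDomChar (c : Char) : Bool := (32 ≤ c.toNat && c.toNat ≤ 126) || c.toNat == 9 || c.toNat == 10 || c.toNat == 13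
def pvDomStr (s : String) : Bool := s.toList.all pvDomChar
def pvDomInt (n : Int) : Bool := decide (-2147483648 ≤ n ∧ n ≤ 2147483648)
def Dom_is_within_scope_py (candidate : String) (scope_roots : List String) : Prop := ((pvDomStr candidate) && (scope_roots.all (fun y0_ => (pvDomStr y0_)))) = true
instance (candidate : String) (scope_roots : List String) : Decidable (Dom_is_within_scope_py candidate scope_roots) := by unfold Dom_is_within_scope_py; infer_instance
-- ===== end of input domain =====

-- B inverts A's scan: instead of testing each scope root against the candidate with ==/startswith,
-- it builds the set of all '/'-boundary ancestor prefixes of the candidate once and intersects it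
-- with the set of normalized scope roots (objective: alternative algorithm, same cost class).

-- s.rstrip("/") on code points: drop every trailing '/' (hand port, exact — PySem has no rstrip-with-chars)
def pyRstripSlash (l : List Char) : List Char := (l.reverse.dropWhile (· == '/')).reverse

-- ===== PORT A =====
def is_within_scope_py (candidate : String) (scope_roots : List String) : Bool :=
  let normalized_candidate := pyRstripSlash candidate.toList
  scope_roots.any (fun scope =>
    let normalized_scope := pyRstripSlash scope.toList
    normalized_candidate == normalized_scope ||
      PySem.Chars.startswith normalized_candidate (normalized_scope ++ ['/']))

-- ===== PORT B =====
def is_within_scope_py_alt (candidate : String) (scope_roots : List String) : Bool :=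
  let normalized := pyRstripSlash candidate.toList
  let prefixes :=
    PySem.Set.update (PySem.Set.ofList [normalized])
      ((((PySem.List.enumerate normalized 0).filter (fun p => p.2 == '/')).map
        (fun p => PySem.List.slice normalized none (some p.1))))
  let scopes := PySem.Set.ofList (scope_roots.map (fun scope => pyRstripSlash scope.toList))
  !(PySem.Set.isdisjoint prefixes scopes)

-- ===== PRECONDITION & SPEC =====
def Spec_is_within_scope_py (candidate : String) (scope_roots : List String) (out : Bool) : Prop := out = is_within_scope_py_alt candidate scope_roots
instance (candidate : String) (scope_roots : List String) (out : Bool) : Decidable (Spec_is_within_scope_py candidate scope_roots out) := by unfold Spec_is_within_scope_py; infer_instance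

-- ===== CLAIM (what is proved, stated in full; the proofs are below) =====
def Claim_equal_is_within_scope_py : Prop := ∀ (candidate : String) (scope_roots : List String), Dom_is_within_scope_py candidate scope_roots → Spec_is_within_scope_py candidate scope_roots (is_within_scope_py candidate scope_roots)

-- ===== LEMMAS AND PROOFS =====

-- startswith a slash-terminated prefix = a '/'-boundary cut of nc
theorem prefix_slash_iff (nc ns : List Char) :
    (ns ++ ['/']) <+: nc ↔ ∃ k, ∃ _ : k < nc.length, nc[k] = '/' ∧ ns = nc.take k := by
  constructor
  · rintro ⟨t, ht⟩
    subst ht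
    refine ⟨ns.length, ?_, ?_, ?_⟩
    · simp only [List.length_append, List.length_cons, List.length_nil]
      omega
    · have hlt : ns.length < (ns ++ ['/']).length := by simp
      rw [List.getElem_append_left hlt, List.getElem_concat_length]
      rfl
    · rw [List.append_assoc, List.take_left]
  · rintro ⟨k, hk, hc, rfl⟩
    refine ⟨nc.drop (k + 1), ?_⟩
    calc nc.take k ++ ['/'] ++ nc.drop (k + 1)
        = nc.take k ++ nc[k] :: nc.drop (k + 1) := by rw [hc]; simp
      _ = nc.take k ++ nc.drop k := by rw [List.drop_eq_getElem_cons hk]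
      _ = nc := List.take_append_drop k nc

-- membership in B's prefix set = A's per-scope test
theorem mem_prefixes_iff (nc ns : List Char) :
    ns ∈ PySem.Set.update (PySem.Set.ofList [nc])
      ((((PySem.List.enumerate nc 0).filter (fun p => p.2 == '/')).map
        (fun p => PySem.List.slice nc none (some p.1))))
    ↔ (nc = ns ∨ (ns ++ ['/']) <+: nc) := by
  rw [PySem.Set.mem_update, prefix_slash_iff]
  simp only [PySem.Set.mem_ofList, List.mem_singleton, List.mem_map, List.mem_filter,
    PySem.List.mem_enumerate_iff, beq_iff_eq]
  constructor
  · rintro (rfl | ⟨p, ⟨⟨k, hk, rfl⟩, hc⟩, rfl⟩)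
    · exact Or.inl rfl
    · refine Or.inr ⟨k, hk, hc, ?_⟩
      have : ((0 : Int) + (k : Nat)) = ((k : Nat) : Int) := by simp
      rw [this, PySem.List.slice_to_natCast]
  · rintro (rfl | ⟨k, hk, hc, rfl⟩)
    · exact Or.inl rfl
    · refine Or.inr ⟨((0 : Int) + (k : Nat), nc[k]), ⟨⟨k, hk, rfl⟩, hc⟩, ?_⟩
      have : ((0 : Int) + (k : Nat)) = ((k : Nat) : Int) := by simp
      rw [this, PySem.List.slice_to_natCast]

theorem alt_iff (candidate : String) (scope_roots : List String) :
    is_within_scope_py_alt candidate scope_roots = true ↔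
      ∃ scope ∈ scope_roots,
        (pyRstripSlash candidate.toList = pyRstripSlash scope.toList ∨
          (pyRstripSlash scope.toList ++ ['/']) <+: pyRstripSlash candidate.toList) := by
  simp only [is_within_scope_py_alt, Bool.not_eq_true']
  rw [← Bool.not_eq_true, PySem.Set.isdisjoint_iff]
  push Not
  constructor
  · rintro ⟨x, hxP, hxS⟩
    rw [PySem.Set.mem_ofList] at hxS
    obtain ⟨scope, hscope, rfl⟩ := List.mem_map.mp hxS
    exact ⟨scope, hscope, (mem_prefixes_iff _ _).mp hxP⟩
  · rintro ⟨scope, hscope, h⟩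
    exact ⟨_, (mem_prefixes_iff _ _).mpr h,
      by rw [PySem.Set.mem_ofList]; exact List.mem_map.mpr ⟨scope, hscope, rfl⟩⟩

theorem orig_iff (candidate : String) (scope_roots : List String) :
    is_within_scope_py candidate scope_roots = true ↔
      ∃ scope ∈ scope_roots,
        (pyRstripSlash candidate.toList = pyRstripSlash scope.toList ∨
          (pyRstripSlash scope.toList ++ ['/']) <+: pyRstripSlash candidate.toList) := by
  simp only [is_within_scope_py, List.any_eq_true, Bool.or_eq_true, beq_iff_eq, PySem.Chars.startswith_iff]

-- ===== VERDICT (by name: the statement is the Claim_ definition above) =====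
theorem is_within_scope_py_spec : Claim_equal_is_within_scope_py := by
  intro candidate scope_roots _
  unfold Spec_is_within_scope_py
  cases hB' : is_within_scope_py_alt candidate scope_roots
  · rw [← Bool.not_eq_true]
    intro hA'
    have h := (alt_iff candidate scope_roots).mpr ((orig_iff candidate scope_roots).mp hA')
    rw [hB'] at h
    simp at h
  · exact (orig_iff candidate scope_roots).mpr ((alt_iff candidate scope_roots).mp hB')
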